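-- pv_equiv track=rewrite | github.com/Maryam99911/projetchatbot | LoadGlobal.py | construire_contextes_courbe_charge
-- ===== SOURCE A (Python) =====
-- def construire_contextes_courbe_charge(data):
--     contexts = []
--     for entry in data:
--         location = entry.get('location', 'emplacement inconnu')
--         maupertuis = entry.get('batiment_maupertuis', 'inconnu')
--         bibliotheque = entry.get('batiment_bibliotheque_universitaire', 'inconnue')
--         pelvoux = entry.get('iup_pelvoux', 'inconnu')
--         romero = entry.get('batiment_iut_romero', 'inconnu')
--         ibgbi = entry.get('batiment_ibgbi', 'inconnu')
--         cycles = entry.get('batiment_premiers_cycles', 'inconnus')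
--         cheval = entry.get('batiment_facteur_cheval', 'inconnu')
--         ile_france = entry.get('batiment_ile_de_france', 'inconnue')
--         bretigny = entry.get('iut_bretigny', 'inconnu')
--
--         context = (f"À l'emplacement {location}, les données de charge sont : "
--                    f"Maupertuis: {maupertuis}, "
--                    f"Bibliothèque Universitaire: {bibliotheque}, "
--                    f"IUP Pelvoux: {pelvoux}, "
--                    f"Bâtiment IUT Romero: {romero}, "
--                    f"Bâtiment IBGBI: {ibgbi}, "
--                    f"Bâtiment Premiers Cycles: {cycles}, "
--                    f"Bâtiment Facteur Cheval: {cheval}, "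
--                    f"Bâtiment Île de France: {ile_france}, "
--                    f"IUT Brétigny: {bretigny}.")
--         contexts.append(context)
--     return contexts
-- ===== SOURCE B (Python) =====
-- # Column-major re-implementation: build one value-column per field across all
-- # entries, then assemble row i by interleaving the constant template parts.
--
-- FIELD_KEYS = [
--     ("location", "emplacement inconnu"),
--     ("batiment_maupertuis", "inconnu"),
--     ("batiment_bibliotheque_universitaire", "inconnue"),
--     ("iup_pelvoux", "inconnu"),
--     ("batiment_iut_romero", "inconnu"),
--     ("batiment_ibgbi", "inconnu"),
--     ("batiment_premiers_cycles", "inconnus"),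
--     ("batiment_facteur_cheval", "inconnu"),
--     ("batiment_ile_de_france", "inconnue"),
--     ("iut_bretigny", "inconnu"),
-- ]
--
-- PARTS = [
--     "À l'emplacement ",
--     ", les données de charge sont : Maupertuis: ",
--     ", Bibliothèque Universitaire: ",
--     ", IUP Pelvoux: ",
--     ", Bâtiment IUT Romero: ",
--     ", Bâtiment IBGBI: ",
--     ", Bâtiment Premiers Cycles: ",
--     ", Bâtiment Facteur Cheval: ",
--     ", Bâtiment Île de France: ",
--     ", IUT Brétigny: ",
-- ]
--
--
-- def construire_contextes_courbe_charge(data):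
--     # stage 1: one pass per field, field-major
--     columns = [[entry.get(key, default) for entry in data]
--                for key, default in FIELD_KEYS]
--     # stage 2: assemble each output row from the columns by index
--     return ["".join(part + col[i] for part, col in zip(PARTS, columns)) + "."
--             for i in range(len(data))]
-- ===== Notes on version B (the rewrite author's own statement) =====
-- stated objective: alternative
-- what changed: Replaces A's entry-major single pass (nine named lookups feeding one hand-written f-string per entry) by a column-major staged computation: one pass per field builds that field's value column over all entries, then each output line is assembled by index by interleaving constant template parts with the columns and joining.
import Mathlib
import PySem

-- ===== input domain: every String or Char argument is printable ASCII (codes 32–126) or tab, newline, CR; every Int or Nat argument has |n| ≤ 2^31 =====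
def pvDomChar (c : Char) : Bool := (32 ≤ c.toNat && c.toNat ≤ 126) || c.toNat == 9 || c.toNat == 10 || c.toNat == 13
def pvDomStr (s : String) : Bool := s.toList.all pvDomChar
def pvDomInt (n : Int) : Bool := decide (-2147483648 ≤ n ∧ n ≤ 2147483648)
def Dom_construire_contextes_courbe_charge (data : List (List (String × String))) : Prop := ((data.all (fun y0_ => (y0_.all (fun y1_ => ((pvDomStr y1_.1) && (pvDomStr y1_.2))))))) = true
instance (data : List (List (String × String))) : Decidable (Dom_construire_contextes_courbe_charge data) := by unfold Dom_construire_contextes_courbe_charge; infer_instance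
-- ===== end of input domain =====

-- B rebuilds the result column-major: one pass per field collecting its value column over all
-- entries, then each output line is assembled by index from the constant template parts (alternative decomposition).

-- dict.get(k, default) with first-match semantics on the association list (shared lookup primitive)
def pvGetD (entry : List (String × String)) (k d : String) : String :=
  match entry.find? (fun p => p.1 == k) with
  | some p => p.2
  | none => d

-- ===== PORT A =====
def construire_contextes_courbe_charge (data : List (List (String × String))) : List String :=
  data.foldl
    (fun contexts entry =>
      let location := pvGetD entry "location" "emplacement inconnu"
      let maupertuis := pvGetD entry "batiment_maupertuis" "inconnu"
      let bibliotheque := pvGetD entry "batiment_bibliotheque_universitaire" "inconnue"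
      let pelvoux := pvGetD entry "iup_pelvoux" "inconnu"
      let romero := pvGetD entry "batiment_iut_romero" "inconnu"
      let ibgbi := pvGetD entry "batiment_ibgbi" "inconnu"
      let cycles := pvGetD entry "batiment_premiers_cycles" "inconnus"
      let cheval := pvGetD entry "batiment_facteur_cheval" "inconnu"
      let ile_france := pvGetD entry "batiment_ile_de_france" "inconnue"
      let bretigny := pvGetD entry "iut_bretigny" "inconnu"
      let context :=
        "À l'emplacement " ++ location ++ ", les données de charge sont : " ++
        "Maupertuis: " ++ maupertuis ++ ", " ++ "Bibliothèque Universitaire: " ++ bibliotheque ++ ", " ++ "IUP Pelvoux: " ++ pelvoux ++ ", " ++ "Bâtiment IUT Romero: " ++ romero ++ ", " ++ "Bâtiment IBGBI: " ++ ibgbi ++ ", " ++ "Bâtiment Premiers Cycles: " ++ cycles ++ ", " ++ "Bâtiment Facteur Cheval: " ++ cheval ++ ", " ++ "Bâtiment Île de France: " ++ ile_france ++ ", " ++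
        "IUT Brétigny: " ++ bretigny ++ "."
      contexts ++ [context])
    []

-- ===== PORT B =====
def pvFieldKeys : List (String × String) :=
  [("location", "emplacement inconnu"),
   ("batiment_maupertuis", "inconnu"),
   ("batiment_bibliotheque_universitaire", "inconnue"),
   ("iup_pelvoux", "inconnu"),
   ("batiment_iut_romero", "inconnu"),
   ("batiment_ibgbi", "inconnu"),
   ("batiment_premiers_cycles", "inconnus"),
   ("batiment_facteur_cheval", "inconnu"),
   ("batiment_ile_de_france", "inconnue"),
   ("iut_bretigny", "inconnu")]

def pvParts : List String :=
  ["À l'emplacement ",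
   ", les données de charge sont : Maupertuis: ",
   ", Bibliothèque Universitaire: ",
   ", IUP Pelvoux: ",
   ", Bâtiment IUT Romero: ",
   ", Bâtiment IBGBI: ",
   ", Bâtiment Premiers Cycles: ",
   ", Bâtiment Facteur Cheval: ",
   ", Bâtiment Île de France: ",
   ", IUT Brétigny: "]

def construire_contextes_courbe_charge_alt (data : List (List (String × String))) : List String :=
  let columns := pvFieldKeys.map (fun kd => data.map (fun entry => pvGetD entry kd.1 kd.2))
  (List.range data.length).map (fun i =>
    String.join ((pvParts.zip columns).map (fun pc => pc.1 ++ pc.2.getD i "")) ++ ".")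

-- ===== PRECONDITION & SPEC =====
def Spec_construire_contextes_courbe_charge (data : List (List (String × String))) (out : List String) : Prop := out = construire_contextes_courbe_charge_alt data
instance (data : List (List (String × String))) (out : List String) : Decidable (Spec_construire_contextes_courbe_charge data out) := by unfold Spec_construire_contextes_courbe_charge; infer_instance

-- ===== CLAIM (what is proved, stated in full; the proofs are below) =====
def Claim_equal_construire_contextes_courbe_charge : Prop := ∀ (data : List (List (String × String))), Dom_construire_contextes_courbe_charge data → Spec_construire_contextes_courbe_charge data (construire_contextes_courbe_charge data)

-- ===== LEMMAS AND PROOFS =====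
theorem foldl_append_singleton {α β : Type} (f : α → β) :
    ∀ (data : List α) (acc : List β),
      data.foldl (fun c e => c ++ [f e]) acc = acc ++ data.map f := by
  intro data
  induction data with
  | nil => intro acc; simp
  | cons x xs ih => intro acc; simp [List.foldl, ih]


theorem join_parts (l0 v1 v2 v3 v4 v5 v6 v7 v8 v9 : String) :
    (String.join ["À l'emplacement " ++ l0,
      ", les données de charge sont : Maupertuis: " ++ v1,
      ", Bibliothèque Universitaire: " ++ v2,
      ", IUP Pelvoux: " ++ v3,
      ", Bâtiment IUT Romero: " ++ v4,
      ", Bâtiment IBGBI: " ++ v5,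
      ", Bâtiment Premiers Cycles: " ++ v6,
      ", Bâtiment Facteur Cheval: " ++ v7,
      ", Bâtiment Île de France: " ++ v8,
      ", IUT Brétigny: " ++ v9] ++ ".") =
    ("À l'emplacement " ++ l0 ++ ", les données de charge sont : " ++
      "Maupertuis: " ++ v1 ++ ", " ++
      "Bibliothèque Universitaire: " ++ v2 ++ ", " ++
      "IUP Pelvoux: " ++ v3 ++ ", " ++
      "Bâtiment IUT Romero: " ++ v4 ++ ", " ++
      "Bâtiment IBGBI: " ++ v5 ++ ", " ++
      "Bâtiment Premiers Cycles: " ++ v6 ++ ", " ++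
      "Bâtiment Facteur Cheval: " ++ v7 ++ ", " ++
      "Bâtiment Île de France: " ++ v8 ++ ", " ++
      "IUT Brétigny: " ++ v9 ++ ".") := by
  simp only [String.join, List.foldl, String.empty_append]
  simp only [← String.append_assoc]
  simp only [show ∀ t : String, t ++ ", les données de charge sont : " ++ "Maupertuis: " = t ++ ", les données de charge sont : Maupertuis: " from fun t => by rw [String.append_assoc]; rfl,
    show ∀ t : String, t ++ ", " ++ "Bibliothèque Universitaire: " = t ++ ", Bibliothèque Universitaire: " from fun t => by rw [String.append_assoc]; rfl,
    show ∀ t : String, t ++ ", " ++ "IUP Pelvoux: " = t ++ ", IUP Pelvoux: " from fun t => by rw [String.append_assoc]; rfl,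
    show ∀ t : String, t ++ ", " ++ "Bâtiment IUT Romero: " = t ++ ", Bâtiment IUT Romero: " from fun t => by rw [String.append_assoc]; rfl,
    show ∀ t : String, t ++ ", " ++ "Bâtiment IBGBI: " = t ++ ", Bâtiment IBGBI: " from fun t => by rw [String.append_assoc]; rfl,
    show ∀ t : String, t ++ ", " ++ "Bâtiment Premiers Cycles: " = t ++ ", Bâtiment Premiers Cycles: " from fun t => by rw [String.append_assoc]; rfl,
    show ∀ t : String, t ++ ", " ++ "Bâtiment Facteur Cheval: " = t ++ ", Bâtiment Facteur Cheval: " from fun t => by rw [String.append_assoc]; rfl,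
    show ∀ t : String, t ++ ", " ++ "Bâtiment Île de France: " = t ++ ", Bâtiment Île de France: " from fun t => by rw [String.append_assoc]; rfl,
    show ∀ t : String, t ++ ", " ++ "IUT Brétigny: " = t ++ ", IUT Brétigny: " from fun t => by rw [String.append_assoc]; rfl]

-- ===== VERDICT (by name: the statement is the Claim_ definition above) =====
theorem construire_contextes_courbe_charge_spec : Claim_equal_construire_contextes_courbe_charge := by
  intro data _
  unfold Spec_construire_contextes_courbe_charge
  unfold construire_contextes_courbe_charge construire_contextes_courbe_charge_alt
  rw [foldl_append_singleton]
  simp only [List.nil_append]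
  apply List.ext_getElem
  · simp
  · intro i h1 h2
    simp only [List.getElem_map, List.getElem_range]
    simp only [pvFieldKeys, List.map, pvParts, List.zip, List.zipWith]
    have hlen : i < data.length := by simpa using h2
    rw [List.getD_eq_getElem?_getD, List.getD_eq_getElem?_getD, List.getD_eq_getElem?_getD,
      List.getD_eq_getElem?_getD, List.getD_eq_getElem?_getD, List.getD_eq_getElem?_getD,
      List.getD_eq_getElem?_getD, List.getD_eq_getElem?_getD, List.getD_eq_getElem?_getD,
      List.getD_eq_getElem?_getD]
    simp only [List.getElem?_map, List.getElem?_eq_getElem hlen, Option.map_some, Option.getD_some]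
    exact (join_parts _ _ _ _ _ _ _ _ _ _).symm
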